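-- pv_equiv track=rewrite | github.com/fenris-demo-dashboard/demo-dashboard | demo_supplements/aesthetics/aesthetics.py | camel_case_to_split_title
-- ===== SOURCE A (Python) =====
-- def camel_case_to_split_title(string: str):
--     """Split a camel case string to one with title case."""
--     if string.isupper():
--         return string
--     else:
--         start_idx = [i for i, e in enumerate(string) if e.isupper()] + [len(string)]
--
--         start_idx = [0] + start_idx
--         split_string = [string[x:y] for x, y in zip(start_idx, start_idx[1:])]
--         return " ".join(x.title() for x in split_string)
-- ===== SOURCE B (Python) =====
-- def camel_case_to_split_title(string: str):
--     """Split a camel case string to one with title case."""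
--     if string.isupper():
--         return string
--     words = []
--     acc = ""
--     for ch in string:
--         if ch.isupper():
--             words.append(acc)
--             acc = ch
--         else:
--             acc += ch
--     words.append(acc)
--     return " ".join(w.title() for w in words)
-- ===== Notes on version B (the rewrite author's own statement) =====
-- stated objective: simpler
-- what changed: Replaced the uppercase-index table built with enumerate plus zip-of-consecutive-indices slicing by a single pass over the characters with a current-word accumulator that is flushed at each uppercase character.
import Mathlib
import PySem

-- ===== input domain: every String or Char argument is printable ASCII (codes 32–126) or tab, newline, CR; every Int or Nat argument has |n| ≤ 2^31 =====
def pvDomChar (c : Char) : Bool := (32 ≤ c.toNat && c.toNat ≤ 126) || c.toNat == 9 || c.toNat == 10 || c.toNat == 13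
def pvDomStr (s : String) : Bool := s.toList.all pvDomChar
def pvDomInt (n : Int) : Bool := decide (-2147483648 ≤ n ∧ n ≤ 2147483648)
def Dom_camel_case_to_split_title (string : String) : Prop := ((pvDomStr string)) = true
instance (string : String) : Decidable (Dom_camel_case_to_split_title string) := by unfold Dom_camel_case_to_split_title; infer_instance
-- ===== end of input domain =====

-- B is the same split-at-uppercase task done in one pass with a word accumulator instead of
-- building an index table and slicing; objective: simpler, not faster.

-- shared hand-ports of the Python builtins str.isupper() and str.title(), exact on the ASCII domain
-- (ASCII cased characters are exactly the letters)
def pvStrIsupper (cs : List Char) : Bool :=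
  cs.any (fun c => PySem.Chars.isupper c || PySem.Chars.islower c) &&
  cs.all (fun c => !PySem.Chars.islower c)

-- str.title(): an alphabetic char is uppercased after a non-alphabetic char (or at the start),
-- lowercased after an alphabetic one; exact on ASCII
def pvTitleGo (prevAlpha : Bool) : List Char → List Char
  | [] => []
  | c :: rest =>
      if PySem.Chars.isalpha c then
        (if prevAlpha then PySem.Chars.lowerChar c else PySem.Chars.upperChar c) :: pvTitleGo true rest
      else c :: pvTitleGo false rest

def pvTitle (cs : List Char) : List Char := pvTitleGo false cs

-- ===== PORT A =====
-- literal transliteration: uppercase-index table, prepend 0, append len, slice between consecutive indices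
def pvIdxsA (cs : List Char) : List Int :=
  ((PySem.List.enumerate cs).filter (fun p => PySem.Chars.isupper p.2)).map Prod.fst

def camel_case_to_split_title (string : String) : String :=
  let cs := string.toList
  if pvStrIsupper cs then string
  else
    let startIdx : List Int := pvIdxsA cs ++ [(cs.length : Int)]
    let startIdx : List Int := 0 :: startIdx
    let splitString := (startIdx.zip startIdx.tail).map
      (fun p => PySem.List.slice cs (some p.1) (some p.2))
    String.ofList (PySem.Chars.join [' '] (splitString.map pvTitle))

-- ===== PORT B =====
-- single pass: flush the accumulator at each uppercase char
def pvGoB (cs : List Char) (acc : List Char) (words : List (List Char)) : List (List Char) :=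
  match cs with
  | [] => words ++ [acc]
  | c :: rest =>
      if PySem.Chars.isupper c then pvGoB rest [c] (words ++ [acc])
      else pvGoB rest (acc ++ [c]) words

def camel_case_to_split_title_alt (string : String) : String :=
  let cs := string.toList
  if pvStrIsupper cs then string
  else String.ofList (PySem.Chars.join [' '] ((pvGoB cs [] []).map pvTitle))

-- ===== PRECONDITION & SPEC =====
def Spec_camel_case_to_split_title (string : String) (out : String) : Prop := out = camel_case_to_split_title_alt string
instance (string : String) (out : String) : Decidable (Spec_camel_case_to_split_title string out) := by unfold Spec_camel_case_to_split_title; infer_instance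

-- ===== CLAIM (what is proved, stated in full; the proofs are below) =====
def Claim_equal_camel_case_to_split_title : Prop := ∀ (string : String), Dom_camel_case_to_split_title string → Spec_camel_case_to_split_title string (camel_case_to_split_title string)

-- ===== LEMMAS AND PROOFS =====

-- apply f to the head of a list, keep the tail
def pvMapHead (f : List Char → List Char) : List (List Char) → List (List Char)
  | [] => []
  | x :: xs => f x :: xs

-- Nat-valued version of A's uppercase-index table
def pvNatIdxs : List Char → List Nat
  | [] => []
  | c :: rest =>
      if PySem.Chars.isupper c then 0 :: (pvNatIdxs rest).map (· + 1)
      else (pvNatIdxs rest).map (· + 1)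

def pvSliceF (cs : List Char) (p : Nat × Nat) : List Char := (cs.drop p.1).take (p.2 - p.1)

def pvNatParts (cs : List Char) : List (List Char) :=
  ((0 :: (pvNatIdxs cs ++ [cs.length])).zip (pvNatIdxs cs ++ [cs.length])).map (pvSliceF cs)

theorem idxs_shift (cs : List Char) (s : Nat) :
    ((PySem.List.enumerate cs (s : Int)).filter (fun p => PySem.Chars.isupper p.2)).map Prod.fst
      = (pvNatIdxs cs).map (fun n => ((s + n : Nat) : Int)) := by
  induction cs generalizing s with
  | nil => simp [PySem.List.enumerate_nil, pvNatIdxs]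
  | cons c r ih =>
    rw [PySem.List.enumerate_cons]
    have h1 : ((s : Int) + 1) = ((s + 1 : Nat) : Int) := by push_cast; ring
    by_cases h : PySem.Chars.isupper c
    · rw [List.filter_cons_of_pos (by simpa using h), List.map_cons, h1, ih (s + 1)]
      simp only [pvNatIdxs, h, ite_true, List.map_cons, List.map_map]
      refine congrArg₂ List.cons (by simp) ?_
      apply List.map_congr_left; intro x _; simp only [Function.comp]; push_cast; ring
    · rw [List.filter_cons_of_neg (by simpa using h), h1, ih (s + 1)]
      simp only [pvNatIdxs, h, Bool.false_eq_true, if_false, List.map_map]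
      apply List.map_congr_left; intro x _; simp only [Function.comp]; push_cast; ring

theorem idxsA_eq (cs : List Char) :
    pvIdxsA cs = (pvNatIdxs cs).map (fun n : Nat => (n : Int)) := by
  have h0 := idxs_shift cs 0
  rw [Nat.cast_zero] at h0
  rw [pvIdxsA, h0]
  refine List.map_congr_left fun x _ => by norm_num

theorem zip_shift_slices (r : List Char) (c : Char) (M : List Nat) (a : Nat) :
    ((((a + 1) :: M.map (· + 1)).zip (M.map (· + 1))).map (pvSliceF (c :: r)))
      = (((a :: M).zip M).map (pvSliceF r)) := by
  induction M generalizing a with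
  | nil => simp
  | cons m M ih =>
    simp only [List.map_cons, List.zip_cons_cons]
    refine congrArg₂ List.cons ?_ (ih m)
    simp only [pvSliceF, List.drop_succ_cons]
    congr 1
    omega

theorem headSlice (c : Char) (r : List Char) (m : Nat) :
    pvSliceF (c :: r) (0, m + 1) = c :: pvSliceF r (0, m) := by
  simp [pvSliceF]

theorem natIdxs_append_len (c : Char) (r : List Char) :
    (pvNatIdxs r).map (· + 1) ++ [(c :: r).length] = (pvNatIdxs r ++ [r.length]).map (· + 1) := by
  simp

theorem natParts_cons (c : Char) (r : List Char) :
    pvNatParts (c :: r) =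
      if PySem.Chars.isupper c then [] :: pvMapHead (c :: ·) (pvNatParts r)
      else pvMapHead (c :: ·) (pvNatParts r) := by
  obtain ⟨m, M, hmM⟩ : ∃ m M, pvNatIdxs r ++ [r.length] = m :: M := by
    cases h : pvNatIdxs r ++ [r.length] with
    | nil => exact absurd h (by simp)
    | cons m M => exact ⟨m, M, rfl⟩
  by_cases h : PySem.Chars.isupper c
  · have hL : pvNatIdxs (c :: r) ++ [(c :: r).length] = 0 :: (m + 1) :: M.map (· + 1) := by
      simp only [pvNatIdxs, h, ite_true, List.cons_append, List.cons.injEq, true_and]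
      rw [natIdxs_append_len c r, hmM, List.map_cons]
    simp only [pvNatParts, hL, hmM, h, ite_true, List.zip_cons_cons, List.map_cons, pvMapHead]
    rw [zip_shift_slices r c M m, headSlice]
    simp [pvSliceF]
  · have hL : pvNatIdxs (c :: r) ++ [(c :: r).length] = (m + 1) :: M.map (· + 1) := by
      simp only [pvNatIdxs, h, Bool.false_eq_true, if_false]
      rw [natIdxs_append_len c r, hmM, List.map_cons]
    simp only [pvNatParts, hL, hmM, h, Bool.false_eq_true, if_false, List.zip_cons_cons, List.map_cons, pvMapHead]
    rw [zip_shift_slices r c M m, headSlice]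

theorem intParts_eq_natParts (cs : List Char) :
    (((0 : Int) :: (pvIdxsA cs ++ [(cs.length : Int)])).zip (pvIdxsA cs ++ [(cs.length : Int)])).map
        (fun p => PySem.List.slice cs (some p.1) (some p.2)) = pvNatParts cs := by
  have hN : pvIdxsA cs ++ [(cs.length : Int)] = (pvNatIdxs cs ++ [cs.length]).map (fun n : Nat => (n : Int)) := by
    rw [idxsA_eq, List.map_append, List.map_singleton]
  have h0 : (0 : Int) :: (pvNatIdxs cs ++ [cs.length]).map (fun n : Nat => (n : Int))
      = ((0 :: (pvNatIdxs cs ++ [cs.length])).map (fun n : Nat => (n : Int))) := by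
    rw [List.map_cons, Nat.cast_zero]
  simp only [pvNatParts]
  rw [hN, h0, List.zip_map, List.map_map]
  apply List.map_congr_left
  rintro ⟨a, b⟩ _
  simp [PySem.List.slice_natCast, pvSliceF]

theorem goB_acc (cs : List Char) (acc : List Char) (words : List (List Char)) :
    pvGoB cs acc words = words ++ pvMapHead (acc ++ ·) (pvGoB cs [] []) := by
  induction cs generalizing acc words with
  | nil => simp [pvGoB, pvMapHead]
  | cons c r ih =>
    by_cases h : PySem.Chars.isupper c
    · simp only [pvGoB, h, ite_true]
      rw [ih [c] (words ++ [acc]), ih [c] ([] ++ [[]])]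
      cases pvGoB r [] [] <;> simp [pvMapHead]
    · simp only [pvGoB, h, Bool.false_eq_true, if_false]
      rw [ih (acc ++ [c]) words, ih ([] ++ [c]) []]
      cases pvGoB r [] [] <;> simp [pvMapHead]

theorem goB_eq_natParts (cs : List Char) : pvGoB cs [] [] = pvNatParts cs := by
  induction cs with
  | nil => rfl
  | cons c r ih =>
    rw [natParts_cons, ← ih]
    by_cases h : PySem.Chars.isupper c
    · simp only [pvGoB, h, ite_true, List.nil_append]
      rw [goB_acc r [c] [[]]]
      cases pvGoB r [] [] <;> simp [pvMapHead]
    · simp only [pvGoB, h, Bool.false_eq_true, if_false, List.nil_append]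
      rw [goB_acc r [c] []]
      cases pvGoB r [] [] <;> simp [pvMapHead]

-- ===== VERDICT (by name: the statement is the Claim_ definition above) =====
theorem camel_case_to_split_title_spec : Claim_equal_camel_case_to_split_title := by
  intro s _
  unfold Spec_camel_case_to_split_title camel_case_to_split_title camel_case_to_split_title_alt
  by_cases h : pvStrIsupper s.toList
  · simp [h]
  · simp only [h, Bool.false_eq_true, if_false, List.tail_cons]
    rw [intParts_eq_natParts, goB_eq_natParts]
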